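-- pv_equiv track=rewrite | github.com/Rajanm001/gpt-r1-advanced-ai-assistant | backend/app/services/multi_tool_orchestrator.py | _check_terminology_consistency
-- ===== SOURCE A (Python) =====
-- def _check_terminology_consistency(content: str) -> bool:
--     """Check terminology consistency"""
--     # Check for consistent use of technical terms
--     words = content.lower().split()
--     word_count = {}
--
--     for word in words:
--         if len(word) > 6:  # Focus on longer, potentially technical words
--             word_count[word] = word_count.get(word, 0) + 1
--
--     # If technical words are used consistently (repeated), it's good
--     repeated_words = [word for word, count in word_count.items() if count > 1]
--     return len(repeated_words) > 0
-- ===== SOURCE B (Python) =====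
-- def _check_terminology_consistency(content: str) -> bool:
--     """Check terminology consistency"""
--     # Single early-exiting pass: a long word seen twice means a repeat.
--     seen = set()
--     for word in content.lower().split():
--         if len(word) > 6:
--             if word in seen:
--                 return True
--             seen.add(word)
--     return False
-- ===== Notes on version B (the rewrite author's own statement) =====
-- stated objective: simpler
-- what changed: Replaces A's two passes (build a full count dict over all words, then comprehension-filter it for counts > 1) with a single early-exiting scan that keeps only a set of long words already seen and returns True at the first repeat.
import Mathlib
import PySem

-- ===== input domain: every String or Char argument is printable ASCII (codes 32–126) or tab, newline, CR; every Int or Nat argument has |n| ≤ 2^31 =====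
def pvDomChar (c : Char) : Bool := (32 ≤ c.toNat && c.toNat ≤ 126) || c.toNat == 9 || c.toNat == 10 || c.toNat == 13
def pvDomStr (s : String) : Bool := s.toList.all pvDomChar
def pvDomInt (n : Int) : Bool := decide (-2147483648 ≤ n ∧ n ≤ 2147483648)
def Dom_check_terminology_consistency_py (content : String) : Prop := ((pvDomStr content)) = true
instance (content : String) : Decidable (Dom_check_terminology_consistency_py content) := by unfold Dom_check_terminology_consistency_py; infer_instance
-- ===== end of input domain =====

-- B replaces A's build-count-dict-then-filter two-pass with one early-exiting pass over a seen-set (objective: simpler — one shorter early-exiting loop).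

-- ===== PORT A =====
def check_terminology_consistency_py (content : String) : Bool :=
  let words := PySem.Str.split₀ (PySem.Str.lower content)
  let word_count : PySem.Dict String Int :=
    words.foldl (fun d word =>
      if PySem.Str.len word > 6 then d.insert word (d.getD word 0 + 1) else d)
      PySem.Dict.empty
  let repeated_words := (word_count.items.filter (fun p => p.2 > 1)).map Prod.fst
  decide ((repeated_words.length : Int) > 0)

-- ===== PORT B =====
def pvAltLoop (ws : List String) (seen : PySem.Set String) : Bool :=
  match ws with
  | [] => false
  | word :: rest =>
    if PySem.Str.len word > 6 then
      if PySem.Set.contains seen word then true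
      else pvAltLoop rest (PySem.Set.add seen word)
    else pvAltLoop rest seen

def check_terminology_consistency_py_alt (content : String) : Bool :=
  pvAltLoop (PySem.Str.split₀ (PySem.Str.lower content)) PySem.Set.empty

-- ===== PRECONDITION & SPEC =====
def Spec_check_terminology_consistency_py (content : String) (out : Bool) : Prop := out = check_terminology_consistency_py_alt content
instance (content : String) (out : Bool) : Decidable (Spec_check_terminology_consistency_py content out) := by unfold Spec_check_terminology_consistency_py; infer_instance

-- ===== CLAIM (what is proved, stated in full; the proofs are below) =====
def Claim_equal_check_terminology_consistency_py : Prop := ∀ (content : String), Dom_check_terminology_consistency_py content → Spec_check_terminology_consistency_py content (check_terminology_consistency_py content)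

-- ===== LEMMAS AND PROOFS =====

-- B's loop decides "seen ++ long words of ws has a duplicate", provided seen has none.
theorem pvAltLoop_eq (ws : List String) (seen : List String) (hnd : seen.Nodup) :
    pvAltLoop ws seen
      = !decide ((seen ++ ws.filter (fun w => decide (6 < w.length))).Nodup) := by
  induction ws generalizing seen with
  | nil => simp [pvAltLoop, hnd]
  | cons word rest ih =>
    by_cases hp : 6 < word.length
    · by_cases hmem : word ∈ seen
      · have hnot : ¬ (seen ++ word :: rest.filter (fun w : String => decide (6 < w.length))).Nodup :=
          fun h => (List.disjoint_of_nodup_append h) hmem (by simp)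
        simp [pvAltLoop, hp, hmem, hnot]
      · have hnd' : (seen ++ [word]).Nodup := by
          simp [List.nodup_append, hnd]
          exact fun a ha h => hmem (h ▸ ha)
        have h2 := ih (seen ++ [word]) hnd'
        calc pvAltLoop (word :: rest) seen
            = pvAltLoop rest (seen ++ [word]) := by simp [pvAltLoop, hp, hmem]
          _ = !decide ((seen ++ [word] ++ rest.filter (fun w : String => decide (6 < w.length))).Nodup) := h2
          _ = _ := by simp [hp, List.append_assoc]
    · have h2 := ih seen hnd
      calc pvAltLoop (word :: rest) seen
          = pvAltLoop rest seen := by simp [pvAltLoop, hp]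
        _ = _ := by rw [h2]; simp [hp]

-- A's count-dict / filter pipeline over any word list decides "ws has a duplicate".
theorem pvCounter_core (ws : List String) :
    decide (((((PySem.Dict.counter ws).items.filter (fun p => p.2 > 1)).map Prod.fst).length : Int) > 0)
      = !decide ws.Nodup := by
  rw [PySem.Dict.items_counter]
  have key : ((PySem.Set.ofList ws).map (fun k => (k, (ws.count k : Int)))).filter
      (fun p => decide (p.2 > 1)) ≠ [] ↔ ¬ ws.Nodup := by
    constructor
    · intro hne hnd
      obtain ⟨p, hp⟩ := List.exists_mem_of_ne_nil _ hne
      have hmf := List.mem_filter.mp hp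
      obtain ⟨a, _, rfl⟩ := List.mem_map.mp hmf.1
      have h2 : (1 : Int) < (ws.count a : Int) := by simpa using hmf.2
      have h3 : 1 < ws.count a := by exact_mod_cast h2
      have := List.nodup_iff_count_le_one.mp hnd a
      omega
    · intro hnd hnil
      have : ∃ k, 1 < ws.count k := by
        by_contra hall
        push_neg at hall
        exact hnd (List.nodup_iff_count_le_one.mpr (fun a => by have := hall a; omega))
      obtain ⟨k, hk⟩ := this
      have hkmem : k ∈ ws := List.count_pos_iff.mp (by omega)
      have hmem : (k, (ws.count k : Int)) ∈ ((PySem.Set.ofList ws).map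
          (fun k => (k, (ws.count k : Int)))).filter (fun p => decide (p.2 > 1)) := by
        refine List.mem_filter.mpr ⟨List.mem_map.mpr ⟨k, ?_, rfl⟩, by simp; exact_mod_cast hk⟩
        simpa [PySem.Set.mem_ofList] using hkmem
      rw [hnil] at hmem
      simp at hmem
  have hiff : ((((((PySem.Set.ofList ws).map (fun k => (k, (ws.count k : Int)))).filter
      (fun p => decide (p.2 > 1))).map Prod.fst).length : Int) > 0) ↔ ¬ ws.Nodup := by
    rw [gt_iff_lt, Int.natCast_pos, List.length_map, List.length_pos_iff]
    exact key
  rcases Decidable.em ws.Nodup with hnd | hnd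
  · rw [decide_eq_false (fun h => (hiff.mp h) hnd), decide_eq_true hnd]
    rfl
  · rw [decide_eq_true (hiff.mpr hnd), decide_eq_false hnd]
    rfl

-- A's whole pipeline equals the duplicate test on the filtered word list.
theorem portA_eq (content : String) :
    check_terminology_consistency_py content
      = !decide (((PySem.Str.split₀ (PySem.Str.lower content)).filter
          (fun w => decide (6 < w.length))).Nodup) := by
  simp only [check_terminology_consistency_py]
  rw [PySem.List.foldl_ite_eq_foldl_filter, PySem.Dict.foldl_insert_getD_add_one_eq_counter,
    pvCounter_core]
  have hpred : (fun w : String => decide (PySem.Str.len w > 6)) = (fun w => decide (6 < w.length)) := by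
    funext w
    simp [PySem.Str.len_eq]
  rw [hpred]

-- ===== VERDICT (by name: the statement is the Claim_ definition above) =====
theorem check_terminology_consistency_py_spec : Claim_equal_check_terminology_consistency_py := by
  intro content _
  show check_terminology_consistency_py content = check_terminology_consistency_py_alt content
  rw [portA_eq, check_terminology_consistency_py_alt,
    show (PySem.Set.empty : PySem.Set String) = [] from rfl,
    pvAltLoop_eq _ _ List.nodup_nil, List.nil_append]
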